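-- pv_equiv track=rewrite | github.com/donc0n/programmers-challenges | Graph/solution3.py | solution
-- ===== SOURCE A (Python) =====
-- def solution(arrows): # 오일러 다면체 정리 v-e+f = 1 => f = e+1-v
--     move = [[0, 1], [1, 1], [1, 0], [1, -1], [0, -1], [-1, -1], [-1, 0], [-1, 1]]
--     x , y = 0, 0
--     vertices = set()
--     edges = set()
--     vertices.add((x, y))
--     for arrow in arrows:
--         # 좌표를 두 배로 만들어서 존재하지 않는 교차점까지 체크할 수 있게 한다.
--         for i in range(2):
--             start = (x, y)
--             x += move[arrow][0]
--             y += move[arrow][1]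
--             end = (x, y)
--             vertices.add(end)
--             if start <= end:
--                 edges.add((start, end))
--             else:
--                 edges.add((end, start))
--     answer = len(edges) + 1 - len(vertices)
--     return answer
-- ===== SOURCE B (Python) =====
-- def solution(arrows):
--     # Union-find cycle counting: each newly seen edge that joins two already-connected
--     # vertices closes one face; the total equals A's Euler-formula value e+1-v because
--     # the walk graph is connected.
--     move = [[0, 1], [1, 1], [1, 0], [1, -1], [0, -1], [-1, -1], [-1, 0], [-1, 1]]
--     parent = {(0, 0): (0, 0)}
--     seen = set()
--
--     def find(v):
--         while parent[v] != v:
--             v = parent[v]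
--         return v
--
--     x, y = 0, 0
--     faces = 0
--     for arrow in arrows:
--         dx, dy = move[arrow]
--         for _ in range(2):
--             nx, ny = x + dx, y + dy
--             edge = ((x, y), (nx, ny)) if (x, y) <= (nx, ny) else ((nx, ny), (x, y))
--             if edge not in seen:
--                 seen.add(edge)
--                 if (nx, ny) not in parent:
--                     parent[(nx, ny)] = (nx, ny)
--                 rs, re = find((x, y)), find((nx, ny))
--                 if rs == re:
--                     faces += 1
--                 else:
--                     parent[re] = rs
--             x, y = nx, ny
--     return faces
-- ===== Notes on version B (the rewrite author's own statement) =====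
-- stated objective: alternative
-- what changed: B replaces A's Euler-formula arithmetic on the final vertex and edge set sizes by an incremental union-find over visited vertices that counts a face each time a newly seen edge connects two already-connected vertices.
import Mathlib
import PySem

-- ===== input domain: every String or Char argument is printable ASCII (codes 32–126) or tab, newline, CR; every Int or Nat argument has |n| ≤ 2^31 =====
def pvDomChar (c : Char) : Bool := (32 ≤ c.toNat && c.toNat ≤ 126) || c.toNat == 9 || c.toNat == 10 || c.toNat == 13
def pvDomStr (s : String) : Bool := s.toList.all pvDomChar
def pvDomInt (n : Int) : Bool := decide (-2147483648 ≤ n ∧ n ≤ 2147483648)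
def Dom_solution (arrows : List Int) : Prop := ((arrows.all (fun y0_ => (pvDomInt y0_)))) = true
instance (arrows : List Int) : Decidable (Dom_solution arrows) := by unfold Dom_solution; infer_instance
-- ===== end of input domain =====

-- B replaces A's final Euler-formula arithmetic on vertex/edge set sizes by an incremental
-- union-find cycle count (objective: alternative algorithm, same asymptotic cost).

-- shared data / helpers: the move table and Python's tuple comparison used to normalize an edge
def moveTbl : List (Int × Int) := [(0,1),(1,1),(1,0),(1,-1),(0,-1),(-1,-1),(-1,0),(-1,1)]

def pleq (a b : Int × Int) : Bool := decide (a.1 < b.1 ∨ (a.1 = b.1 ∧ a.2 ≤ b.2))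

def normEdge (p q : Int × Int) : (Int × Int) × (Int × Int) := if pleq p q then (p, q) else (q, p)

-- ===== PORT A =====
-- one half-step of A's inner loop: advance, record vertex, record normalized edge
def stepA (d : Int × Int)
    (s : (Int × Int) × PySem.Set (Int × Int) × PySem.Set ((Int × Int) × (Int × Int))) :
    (Int × Int) × PySem.Set (Int × Int) × PySem.Set ((Int × Int) × (Int × Int)) :=
  let start := s.1
  let e := (start.1 + d.1, start.2 + d.2)
  (e, PySem.Set.add s.2.1 e, PySem.Set.add s.2.2 (normEdge start e))

def solution (arrows : List Int) : Int :=
  let init : (Int × Int) × PySem.Set (Int × Int) × PySem.Set ((Int × Int) × (Int × Int)) :=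
    ((0, 0), PySem.Set.add PySem.Set.empty (0, 0), PySem.Set.empty)
  let fin := arrows.foldl (fun s a =>
    -- move[arrow]: Python raises IndexError outside [-8,8) — excluded by Pre_solution
    let d := (PySem.List.pyGet? moveTbl a).getD (0, 0)
    stepA d (stepA d s)) init
  (fin.2.2.length : Int) + 1 - (fin.2.1.length : Int)

-- ===== PORT B =====
-- find: chase parent pointers until a fixpoint; fuel makes it total (Python's while-loop;
-- a missing key would be a KeyError in Python — returning v there is never reached on Pre_)
def findRoot (parent : PySem.Dict (Int × Int) (Int × Int)) : Nat → (Int × Int) → (Int × Int)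
  | 0, v => v
  | fuel + 1, v =>
    match parent.get? v with
    | none => v
    | some p => if p = v then v else findRoot parent fuel p

-- one half-step of B's inner loop: skip seen edges, else union-find the edge's endpoints
def stepB (d : Int × Int)
    (s : (Int × Int) × PySem.Set ((Int × Int) × (Int × Int)) × PySem.Dict (Int × Int) (Int × Int) × Int) :
    (Int × Int) × PySem.Set ((Int × Int) × (Int × Int)) × PySem.Dict (Int × Int) (Int × Int) × Int :=
  let pos := s.1
  let seen := s.2.1
  let parent := s.2.2.1
  let faces := s.2.2.2
  let e := (pos.1 + d.1, pos.2 + d.2)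
  let edge := normEdge pos e
  if PySem.Set.contains seen edge then (e, seen, parent, faces)
  else
    let seen' := PySem.Set.add seen edge
    let parent1 := if parent.contains e then parent else parent.insert e e
    let rs := findRoot parent1 (parent1.size + 1) pos
    let re := findRoot parent1 (parent1.size + 1) e
    if rs = re then (e, seen', parent1, faces + 1)
    else (e, seen', parent1.insert re rs, faces)

def solution_alt (arrows : List Int) : Int :=
  let init : (Int × Int) × PySem.Set ((Int × Int) × (Int × Int)) × PySem.Dict (Int × Int) (Int × Int) × Int :=
    ((0, 0), PySem.Set.empty, PySem.Dict.empty.insert (0, 0) (0, 0), 0)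
  (arrows.foldl (fun s a =>
    let d := (PySem.List.pyGet? moveTbl a).getD (0, 0)
    stepB d (stepB d s)) init).2.2.2

-- ===== PRECONDITION & SPEC =====
-- Pre_ excludes exactly the arrows outside [-8, 8), on which A's move[arrow] raises IndexError.
def Pre_solution (arrows : List Int) : Prop := ∀ a ∈ arrows, -8 ≤ a ∧ a < 8
instance (arrows : List Int) : Decidable (Pre_solution arrows) := by unfold Pre_solution; infer_instance

def pvWitness_solution : List Int := [6, 6, 6, 4, 4, 4, 2, 2, 2, 0, 0, 0]

def Spec_solution (arrows : List Int) (out : Int) : Prop := out = solution_alt arrows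
instance (arrows : List Int) (out : Int) : Decidable (Spec_solution arrows out) := by unfold Spec_solution; infer_instance

-- ===== CLAIM (what is proved, stated in full; the proofs are below) =====
def Claim_equal_solution : Prop := ∀ (arrows : List Int), Dom_solution arrows → Pre_solution arrows → Spec_solution arrows (solution arrows)

-- ===== LEMMAS AND PROOFS =====

-- the coupling invariant between A's state (pos, vertices, edges) and B's state (pos, seen, parent, faces)
def InvAB (sA : (Int × Int) × List (Int × Int) × List ((Int × Int) × (Int × Int)))
    (sB : (Int × Int) × List ((Int × Int) × (Int × Int)) × PySem.Dict (Int × Int) (Int × Int) × Int) : Prop :=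
  sB.1 = sA.1 ∧
  sB.2.1 = sA.2.2 ∧
  (sB.2.2.1).keys = sA.2.1 ∧
  (∀ p ∈ (sB.2.2.1).items, p.2 = ((0 : Int), (0 : Int))) ∧
  sA.1 ∈ sA.2.1 ∧
  ((0 : Int), (0 : Int)) ∈ sA.2.1 ∧
  (∀ e ∈ sA.2.2, e.1 ∈ sA.2.1 ∧ e.2 ∈ sA.2.1) ∧
  sB.2.2.2 = (sA.2.2.length : Int) + 1 - (sA.2.1.length : Int)

lemma get?_of_mem_keys_all_zero (d : PySem.Dict (Int × Int) (Int × Int))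
    (hall : ∀ p ∈ d.items, p.2 = ((0 : Int), (0 : Int))) (v : Int × Int) (hv : v ∈ d.keys) :
    d.get? v = some ((0 : Int), (0 : Int)) := by
  cases hg : d.get? v with
  | none => exact absurd ((PySem.Dict.get?_eq_none_iff_not_mem_keys d v).mp hg) (by simp [hv])
  | some w => exact congrArg some (hall (v, w) (PySem.Dict.mem_items_of_get?_eq_some d hg))

lemma findRoot_root (parent : PySem.Dict (Int × Int) (Int × Int))
    (h00 : parent.get? ((0 : Int), (0 : Int)) = some ((0 : Int), (0 : Int)))
    (v : Int × Int) (hv : parent.get? v = some ((0 : Int), (0 : Int)))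
    (fuel : Nat) (hf : 2 ≤ fuel) : findRoot parent fuel v = ((0 : Int), (0 : Int)) := by
  obtain ⟨f, rfl⟩ : ∃ f, fuel = f + 2 := ⟨fuel - 2, by omega⟩
  by_cases hv0 : ((0 : Int), (0 : Int)) = v
  · rw [← hv0]; simp [findRoot, h00]
  · simp [findRoot, hv, h00, hv0]

lemma findRoot_self (parent : PySem.Dict (Int × Int) (Int × Int)) (v : Int × Int)
    (h : parent.get? v = some v) (fuel : Nat) (hf : 1 ≤ fuel) : findRoot parent fuel v = v := by
  obtain ⟨f, rfl⟩ : ∃ f, fuel = f + 1 := ⟨fuel - 1, by omega⟩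
  simp [findRoot, h]

lemma size_pos_of_mem_keys (d : PySem.Dict (Int × Int) (Int × Int)) (v : Int × Int)
    (hv : v ∈ d.keys) : 1 ≤ d.size := by
  simp only [PySem.Dict.keys, List.mem_map] at hv
  obtain ⟨p, hp, -⟩ := hv
  simp only [PySem.Dict.size]
  exact List.length_pos_of_mem hp

lemma normEdge_fst_snd (p q : Int × Int) : normEdge p q = (p, q) ∨ normEdge p q = (q, p) := by
  unfold normEdge; split
  · exact Or.inl rfl
  · exact Or.inr rfl

lemma step_preserve (d : Int × Int)
    (sA : (Int × Int) × List (Int × Int) × List ((Int × Int) × (Int × Int)))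
    (sB : (Int × Int) × List ((Int × Int) × (Int × Int)) × PySem.Dict (Int × Int) (Int × Int) × Int)
    (h : InvAB sA sB) : InvAB (stepA d sA) (stepB d sB) := by
  obtain ⟨pos, V, E⟩ := sA
  obtain ⟨bpos, seen, parent, faces⟩ := sB
  obtain ⟨hpos, hseen, hkeys, hvals, hposV, h00V, hEV, hfaces⟩ := h
  simp only at hpos hseen hkeys hvals hposV h00V hEV hfaces
  subst hpos hseen
  have h00K : ((0 : Int), (0 : Int)) ∈ parent.keys := by rw [hkeys]; exact h00V
  have hg0 : parent.get? ((0 : Int), (0 : Int)) = some ((0 : Int), (0 : Int)) :=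
    get?_of_mem_keys_all_zero parent hvals _ h00K
  have hgp : parent.get? bpos = some ((0 : Int), (0 : Int)) :=
    get?_of_mem_keys_all_zero parent hvals bpos (by rw [hkeys]; exact hposV)
  have hszf : 2 ≤ parent.size + 1 := by
    have := size_pos_of_mem_keys parent _ h00K; omega
  unfold stepA stepB
  simp only []
  set e : Int × Int := (bpos.1 + d.1, bpos.2 + d.2) with he
  set edge := normEdge bpos e with hedge
  have hedge_mem : edge.1 = bpos ∧ edge.2 = e ∨ edge.1 = e ∧ edge.2 = bpos := by
    rcases normEdge_fst_snd bpos e with hc | hc <;> rw [hedge, hc]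
    · exact Or.inl ⟨rfl, rfl⟩
    · exact Or.inr ⟨rfl, rfl⟩
  by_cases hmem : edge ∈ seen
  · -- edge already seen: both sides leave every component unchanged
    have hc : PySem.Set.contains seen edge = true := (PySem.Set.contains_iff seen edge).mpr hmem
    have heV : e ∈ V := by
      rcases hedge_mem with ⟨-, h2⟩ | ⟨h1, -⟩
      · exact h2 ▸ (hEV edge hmem).2
      · exact h1 ▸ (hEV edge hmem).1
    rw [hc, if_pos rfl, PySem.Set.add_of_mem heV, PySem.Set.add_of_mem hmem]
    exact ⟨rfl, rfl, hkeys, hvals, heV, h00V, hEV, hfaces⟩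
  · have hc : PySem.Set.contains seen edge = false := by
      cases hcb : PySem.Set.contains seen edge
      · rfl
      · exact absurd ((PySem.Set.contains_iff seen edge).mp hcb) hmem
    rw [hc]
    simp only [Bool.false_eq_true, if_false]
    rw [PySem.Set.add_of_not_mem hmem]
    have hEV' : ∀ e' ∈ seen ++ [edge], e'.1 ∈ PySem.Set.add V e ∧ e'.2 ∈ PySem.Set.add V e := by
      intro e' he'
      rcases List.mem_append.mp he' with hold | hnew
      · obtain ⟨ha, hb⟩ := hEV e' hold
        exact ⟨(PySem.Set.mem_add V e e'.1).mpr (Or.inl ha), (PySem.Set.mem_add V e e'.2).mpr (Or.inl hb)⟩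
      · rw [List.mem_singleton.mp hnew]
        rcases hedge_mem with ⟨h1, h2⟩ | ⟨h1, h2⟩ <;> rw [h1, h2] <;>
          exact ⟨(PySem.Set.mem_add V e _).mpr (by simp [hposV]), (PySem.Set.mem_add V e _).mpr (by simp [hposV])⟩
    by_cases heV : e ∈ V
    · -- endpoints already connected: B counts one face, A gains one edge and no vertex
      have hce : parent.contains e = true := (PySem.Dict.contains_iff_mem_keys parent e).mpr (by rw [hkeys]; exact heV)
      have hge : parent.get? e = some ((0 : Int), (0 : Int)) :=
        get?_of_mem_keys_all_zero parent hvals e (by rw [hkeys]; exact heV)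
      rw [hce, if_pos rfl, findRoot_root parent hg0 bpos hgp _ hszf,
        findRoot_root parent hg0 e hge _ hszf, if_pos rfl, PySem.Set.add_of_mem heV]
      refine ⟨rfl, rfl, hkeys, hvals, heV, h00V, ?_, ?_⟩
      · simpa [PySem.Set.add_of_mem heV] using hEV'
      · rw [hfaces]; simp [List.length_append]; omega
    · -- new vertex: B unions the fresh root under (0,0), A gains one edge and one vertex
      have hce : parent.contains e = false := by
        cases hcb : parent.contains e
        · rfl
        · exact absurd (by rw [← hkeys]; exact (PySem.Dict.contains_iff_mem_keys parent e).mp hcb) heV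
      have hne0 : ((0 : Int), (0 : Int)) ≠ e := fun hh => heV (hh ▸ h00V)
      have hnep : bpos ≠ e := fun hh => heV (hh ▸ hposV)
      have hg0' : (parent.insert e e).get? ((0 : Int), (0 : Int)) = some ((0 : Int), (0 : Int)) := by
        rw [PySem.Dict.get?_insert_of_ne parent e hne0]; exact hg0
      have hgp' : (parent.insert e e).get? bpos = some ((0 : Int), (0 : Int)) := by
        rw [PySem.Dict.get?_insert_of_ne parent e hnep]; exact hgp
      have hge' : (parent.insert e e).get? e = some e := PySem.Dict.get?_insert_self parent e e
      have hszf' : 2 ≤ (parent.insert e e).size + 1 := by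
        have := size_pos_of_mem_keys (parent.insert e e) e
          ((PySem.Dict.mem_keys_insert parent e e e).mpr (Or.inl rfl))
        omega
      rw [hce]
      simp only [Bool.false_eq_true, if_false]
      rw [findRoot_root _ hg0' bpos hgp' _ hszf', findRoot_self _ e hge' _ (by omega),
        if_neg hne0, PySem.Set.add_of_not_mem heV]
      have hkeys2 : (((parent.insert e e).insert e ((0 : Int), (0 : Int)))).keys = V ++ [e] := by
        rw [PySem.Dict.keys_insert_of_contains (parent.insert e e) _ (PySem.Dict.contains_insert_self parent e e),
          PySem.Dict.keys_insert_of_not_contains parent e hce, hkeys]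
      refine ⟨rfl, rfl, hkeys2, ?_, by simp, by simp [h00V], ?_, ?_⟩
      · intro p hp
        rcases (PySem.Dict.mem_items_insert _ _ _ p).mp hp with hp1 | ⟨hp2, hp3⟩
        · rw [hp1]
        · rcases (PySem.Dict.mem_items_insert _ _ _ p).mp hp2 with hq1 | ⟨hq2, -⟩
          · exact absurd (by rw [hq1]) hp3
          · exact hvals p hq2
      · intro e' he'
        have := hEV' e' he'
        rwa [PySem.Set.add_of_not_mem heV] at this
      · rw [hfaces]; simp [List.length_append]

lemma fold_preserve (arrows : List Int)
    (sA : (Int × Int) × List (Int × Int) × List ((Int × Int) × (Int × Int)))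
    (sB : (Int × Int) × List ((Int × Int) × (Int × Int)) × PySem.Dict (Int × Int) (Int × Int) × Int)
    (h : InvAB sA sB) :
    InvAB (arrows.foldl (fun s a =>
          let d := (PySem.List.pyGet? moveTbl a).getD (0, 0)
          stepA d (stepA d s)) sA)
        (arrows.foldl (fun s a =>
          let d := (PySem.List.pyGet? moveTbl a).getD (0, 0)
          stepB d (stepB d s)) sB) := by
  induction arrows generalizing sA sB with
  | nil => exact h
  | cons a rest ih =>
    simp only [List.foldl_cons]
    exact ih _ _ (step_preserve _ _ _ (step_preserve _ _ _ h))

-- ===== VERDICT (by name: the statement is the Claim_ definition above) =====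
theorem solution_spec : Claim_equal_solution := by
  intro arrows _ _
  unfold Spec_solution solution solution_alt
  have h := fold_preserve arrows
    ((0, 0), PySem.Set.add PySem.Set.empty (0, 0), PySem.Set.empty)
    ((0, 0), PySem.Set.empty, PySem.Dict.empty.insert (0, 0) (0, 0), 0)
    (by unfold InvAB; refine ⟨rfl, rfl, by decide, by decide, by decide, by decide, by decide, by decide⟩)
  obtain ⟨-, -, -, -, -, -, -, h8⟩ := h
  simp only [h8]
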